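-- pv_equiv track=rewrite | github.com/Rav0-main/HeadHunterVacanciesAnalyser | graphicsetter.py | getMedianPaysByWorkTime
-- ===== SOURCE A (Python) =====
-- def getMedianPaysByWorkTime(pays: list[int], workTimes: list[int]) -> dict[int, int]:
--     avgValues: dict[int, int] = {}
--     allPaysByWorkTime: dict[int, list[int]] = {}
--
--     for i in range(0, len(workTimes)):
--         if(workTimes[i] in allPaysByWorkTime):
--             allPaysByWorkTime[workTimes[i]].append(pays[i])
--         else:
--             allPaysByWorkTime[workTimes[i]] = [pays[i]]
--             avgValues[workTimes[i]] = -1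
--
--     differenceWorkTimes: list[int] = []
--     for workTime in allPaysByWorkTime.keys():
--         allPaysByWorkTime[workTime].sort()
--         avgValues[workTime] = allPaysByWorkTime[workTime][len(allPaysByWorkTime[workTime])//2]
--         differenceWorkTimes.append(workTime)
--
--     differenceWorkTimes.sort()
--     sortedAvgValues: dict[int, int] = {}
--     for workTime in differenceWorkTimes:
--         sortedAvgValues[workTime] = avgValues[workTime]
--
--     return sortedAvgValues
-- ===== SOURCE B (Python) =====
-- def getMedianPaysByWorkTime(pays: list[int], workTimes: list[int]) -> dict[int, int]:
--     # One lexicographic sort of (workTime, pay) pairs puts every work-time group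
--     # in a contiguous, pay-sorted run; counting occurrences then locates each
--     # group's middle element by index arithmetic, with no per-group sorting.
--     pairs = sorted(zip(workTimes, pays))
--     counts: dict[int, int] = {}
--     for w, _ in pairs:
--         counts[w] = counts.get(w, 0) + 1
--     medians: dict[int, int] = {}
--     i = 0
--     for w, c in counts.items():
--         medians[w] = pairs[i + c // 2][1]
--         i += c
--     return medians
-- ===== Notes on version B (the rewrite author's own statement) =====
-- stated objective: alternative
-- what changed: A groups pays into a dict of lists, sorts each group separately, sorts the key list and rebuilds a dict; B does ONE lexicographic sort of the (workTime, pay) pairs, so every group is a contiguous pay-sorted run, then counts occurrences and picks each group's middle element by index arithmetic.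
-- outside the precondition, e.g. on getMedianPaysByWorkTime([], [1]): A raises IndexError, B returns {}
import Mathlib
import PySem

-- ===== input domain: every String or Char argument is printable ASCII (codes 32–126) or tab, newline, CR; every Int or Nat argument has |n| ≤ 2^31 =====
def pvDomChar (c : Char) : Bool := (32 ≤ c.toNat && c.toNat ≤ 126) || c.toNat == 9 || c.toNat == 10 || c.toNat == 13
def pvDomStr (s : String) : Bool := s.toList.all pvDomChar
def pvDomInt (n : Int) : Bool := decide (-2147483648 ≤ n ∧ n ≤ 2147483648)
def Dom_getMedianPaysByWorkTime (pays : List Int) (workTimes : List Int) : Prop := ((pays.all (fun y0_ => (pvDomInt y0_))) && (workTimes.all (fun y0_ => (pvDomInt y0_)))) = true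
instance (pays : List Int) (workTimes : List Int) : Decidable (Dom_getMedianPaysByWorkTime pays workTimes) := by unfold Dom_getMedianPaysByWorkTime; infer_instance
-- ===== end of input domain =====

-- B replaces A's hash-grouping + per-group sorts + final key sort by ONE lexicographic sort of
-- (workTime, pay) pairs followed by a counting scan that picks each contiguous group's middle
-- element by index arithmetic (objective: alternative single-sort algorithm).
-- A sorts its dict's value lists in place (a mutation internal to A, dead after the call);
-- only the return value is compared here.

-- ===== PORT A =====
-- second loop: Python sorts allPaysByWorkTime[wt] IN PLACE and then reads its middle element;
-- each key is visited exactly once and the dict is dead afterwards, so the port reads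
-- sorted(getD wt []) — exact for the returned value.
def getMedianPaysByWorkTime (pays : List Int) (workTimes : List Int) : List (Int × Int) :=
  let st := (PySem.List.pyRange 0 (PySem.List.len workTimes) 1).foldl
    (fun (st : PySem.Dict Int Int × PySem.Dict Int (List Int)) i =>
      if st.2.contains (PySem.List.pyGetD workTimes i 0) then
        (st.1, st.2.modify (PySem.List.pyGetD workTimes i 0) []
                 (fun g => g ++ [PySem.List.pyGetD pays i 0]))
      else
        (st.1.insert (PySem.List.pyGetD workTimes i 0) (-1),
         st.2.insert (PySem.List.pyGetD workTimes i 0) [PySem.List.pyGetD pays i 0]))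
    (PySem.Dict.empty, PySem.Dict.empty)
  let st2 := st.2.keys.foldl
    (fun (st2 : PySem.Dict Int Int × List Int) wt =>
      let g := PySem.List.sorted (st.2.getD wt []) (fun x => x)
      (st2.1.insert wt (PySem.List.pyGetD g (PySem.Int.floordiv (PySem.List.len g) 2) 0),
       st2.2 ++ [wt]))
    (st.1, [])
  let ds := PySem.List.sorted st2.2 (fun x => x)
  (ds.foldl (fun (d : PySem.Dict Int Int) wt => d.insert wt (st2.1.getD wt 0))
     PySem.Dict.empty).items

-- ===== PORT B =====
def getMedianPaysByWorkTime_alt (pays : List Int) (workTimes : List Int) : List (Int × Int) :=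
  let pairs := PySem.List.sorted2 (workTimes.zip pays) (fun p => p.1) (fun p => p.2)
  let counts := pairs.foldl
    (fun (d : PySem.Dict Int Int) p => d.insert p.1 (d.getD p.1 0 + 1)) PySem.Dict.empty
  let res := counts.items.foldl
    (fun (st : PySem.Dict Int Int × Int) wc =>
      (st.1.insert wc.1 (PySem.List.pyGetD pairs (st.2 + PySem.Int.floordiv wc.2 2) (0, 0)).2,
       st.2 + wc.2))
    (PySem.Dict.empty, 0)
  res.1.items

-- ===== PRECONDITION & SPEC =====
-- Pre_ excludes exactly the inputs where A raises IndexError: pays shorter than workTimes.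
def Pre_getMedianPaysByWorkTime (pays : List Int) (workTimes : List Int) : Prop :=
  workTimes.length ≤ pays.length
instance (pays : List Int) (workTimes : List Int) : Decidable (Pre_getMedianPaysByWorkTime pays workTimes) := by unfold Pre_getMedianPaysByWorkTime; infer_instance
def pvWitness_getMedianPaysByWorkTime : List Int × List Int := ([30, 10, 20, 40], [1, 2, 1, 2])
def Spec_getMedianPaysByWorkTime (pays : List Int) (workTimes : List Int) (out : List (Int × Int)) : Prop := out = getMedianPaysByWorkTime_alt pays workTimes
instance (pays : List Int) (workTimes : List Int) (out : List (Int × Int)) : Decidable (Spec_getMedianPaysByWorkTime pays workTimes out) := by unfold Spec_getMedianPaysByWorkTime; infer_instance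

-- ===== CLAIM (what is proved, stated in full; the proofs are below) =====
def Claim_equal_getMedianPaysByWorkTime : Prop := ∀ (pays : List Int) (workTimes : List Int), Dom_getMedianPaysByWorkTime pays workTimes → Pre_getMedianPaysByWorkTime pays workTimes → Spec_getMedianPaysByWorkTime pays workTimes (getMedianPaysByWorkTime pays workTimes)

-- ===== LEMMAS AND PROOFS =====

-- the group of pays for work-time w, in input order
def pvGrp (pays : List Int) (workTimes : List Int) (w : Int) : List Int :=
  ((workTimes.zip pays).filter (fun p => p.1 == w)).map (fun p => p.2)

-- the same group, pay-sorted
def pvSG (pays : List Int) (workTimes : List Int) (w : Int) : List Int :=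
  PySem.List.sorted (pvGrp pays workTimes w) (fun x => x)

-- the distinct work-times, ascending
def pvKs (workTimes : List Int) : List Int :=
  PySem.List.sorted (PySem.Set.ofList workTimes) (fun x => x)

-- the value both programs report for work-time w
def pvVal (pays : List Int) (workTimes : List Int) (w : Int) : Int :=
  (pvSG pays workTimes w).getD ((pvSG pays workTimes w).length / 2) 0

-- the lexicographically sorted pair list, written out
def pvT (pays : List Int) (workTimes : List Int) : List (Int × Int) :=
  (pvKs workTimes).flatMap (fun w => (pvSG pays workTimes w).map (fun p => (w, p)))

def pvLexLe (p q : Int × Int) : Prop := p.1 < q.1 ∨ (p.1 = q.1 ∧ p.2 ≤ q.2)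

def pvBefore (p q : Int × Int) : Bool :=
  decide (p.1 < q.1) || (!decide (q.1 < p.1) && decide (p.2 < q.2))

theorem pvLexLe_of_before (p q : Int × Int) (h : pvBefore p q = true) : pvLexLe p q := by
  simp [pvBefore] at h; unfold pvLexLe; omega

theorem pvLexLe_of_not_before (p q : Int × Int) (h : pvBefore p q = false) : pvLexLe q p := by
  simp [pvBefore] at h; unfold pvLexLe; omega

theorem pvLexLe_trans (p q r : Int × Int) (h1 : pvLexLe p q) (h2 : pvLexLe q r) : pvLexLe p r := by
  unfold pvLexLe at *; omega

theorem pvLexLe_antisymm (p q : Int × Int) (h1 : pvLexLe p q) (h2 : pvLexLe q p) : p = q := by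
  unfold pvLexLe at *
  have h : p.1 = q.1 ∧ p.2 = q.2 := by omega
  exact Prod.ext h.1 h.2

theorem pv_insertBy_pairwise (x : Int × Int) (acc : List (Int × Int))
    (h : acc.Pairwise pvLexLe) :
    (PySem.List.insertBy pvBefore x acc).Pairwise pvLexLe := by
  induction acc with
  | nil => simp [PySem.List.insertBy]
  | cons y ys ih =>
    rcases List.pairwise_cons.1 h with ⟨hy, hys⟩
    simp only [PySem.List.insertBy]
    cases hb : pvBefore x y with
    | true =>
      rw [if_pos rfl]
      refine List.pairwise_cons.2 ⟨?_, h⟩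
      intro z hz
      rcases List.mem_cons.1 hz with rfl | hz
      · exact pvLexLe_of_before x z hb
      · exact pvLexLe_trans x y z (pvLexLe_of_before x y hb) (hy z hz)
    | false =>
      rw [if_neg (by simp)]
      refine List.pairwise_cons.2 ⟨?_, ih hys⟩
      intro z hz
      rcases (PySem.List.mem_insertBy pvBefore x z ys).1 hz with rfl | hz
      · exact pvLexLe_of_not_before _ y hb
      · exact hy z hz

theorem pv_foldl_insertBy_pairwise (l acc : List (Int × Int)) (h : acc.Pairwise pvLexLe) :
    (l.foldl (fun acc x => PySem.List.insertBy pvBefore x acc) acc).Pairwise pvLexLe := by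
  induction l generalizing acc with
  | nil => exact h
  | cons x xs ih => exact ih _ (pv_insertBy_pairwise x acc h)

theorem pv_sorted2_eq_foldl (xs : List (Int × Int)) :
    PySem.List.sorted2 xs (fun p => p.1) (fun p => p.2) =
      xs.foldl (fun acc x => PySem.List.insertBy pvBefore x acc) [] := rfl

theorem pv_sorted2_pairwise (xs : List (Int × Int)) :
    (PySem.List.sorted2 xs (fun p => p.1) (fun p => p.2)).Pairwise pvLexLe := by
  rw [pv_sorted2_eq_foldl]
  exact pv_foldl_insertBy_pairwise xs [] (by simp)

-- partitioning a pair list by its (nodup, covering) keys is a permutation of it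
theorem pv_partition_perm (ks : List Int) : ∀ (l : List (Int × Int)), ks.Nodup →
    (∀ p ∈ l, p.1 ∈ ks) →
    (ks.flatMap (fun w => l.filter (fun p => p.1 == w))).Perm l := by
  induction ks with
  | nil =>
    intro l _ hcov
    have : l = [] := by
      cases l with
      | nil => rfl
      | cons p l' => exact absurd (hcov p (by simp)) (by simp)
    simp [this]
  | cons k ks ih =>
    intro l hnd hcov
    rcases List.nodup_cons.1 hnd with ⟨hk, hnd'⟩
    have hrest : ∀ w ∈ ks, l.filter (fun p => p.1 == w) =
        (l.filter (fun p => !(p.1 == k))).filter (fun p => p.1 == w) := by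
      intro w hw
      rw [List.filter_filter]
      apply List.filter_congr
      intro p _
      by_cases hpw : p.1 = w
      · have hwk : ¬ w = k := fun h => hk (h ▸ hw)
        have hne : ¬ p.1 = k := fun h => hwk (by rw [← hpw, h])
        simp [hpw, hwk]
      · simp [hpw]
    have hflat : ks.flatMap (fun w => l.filter (fun p => p.1 == w)) =
        ks.flatMap (fun w => (l.filter (fun p => !(p.1 == k))).filter (fun p => p.1 == w)) := by
      simp only [List.flatMap_def]
      exact congrArg List.flatten (List.map_congr_left hrest)
    rw [List.flatMap_cons, hflat]
    have hih : (ks.flatMap (fun w =>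
        (l.filter (fun p => !(p.1 == k))).filter (fun p => p.1 == w))).Perm
        (l.filter (fun p => !(p.1 == k))) := by
      apply ih _ hnd'
      intro p hp
      rcases List.mem_filter.1 hp with ⟨hpl, hpk⟩
      rcases List.mem_cons.1 (hcov p hpl) with h | h
      · simp [h] at hpk
      · exact h
    exact (hih.append_left _).trans (List.filter_append_perm _ l)

-- retagging a filtered pair with its own key is the identity
theorem pv_map_filter_id (l : List (Int × Int)) (w : Int) :
    (l.filter (fun p => p.1 == w)).map (fun p => ((w : Int), p.2)) =
      l.filter (fun p => p.1 == w) := by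
  have h : ∀ p ∈ l.filter (fun p => p.1 == w), ((w : Int), p.2) = p := by
    intro p hp
    have h1 : p.1 = w := by simpa using (List.mem_filter.1 hp).2
    exact Prod.ext h1.symm rfl
  calc (l.filter (fun p => p.1 == w)).map (fun p => ((w : Int), p.2))
      = (l.filter (fun p => p.1 == w)).map id := List.map_congr_left h
    _ = _ := List.map_id _

theorem pv_flatMap_perm_congr {α β : Type} (ks : List α) (f g : α → List β)
    (h : ∀ w ∈ ks, (f w).Perm (g w)) : (ks.flatMap f).Perm (ks.flatMap g) := by
  induction ks with
  | nil => simp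
  | cons k ks ih =>
    rw [List.flatMap_cons, List.flatMap_cons]
    exact (h k (by simp)).append (ih (fun w hw => h w (by simp [hw])))

theorem pv_ks_nodup (workTimes : List Int) : (pvKs workTimes).Nodup :=
  (PySem.List.sorted_perm (PySem.Set.ofList workTimes) (fun x => x) false).symm.nodup
    (PySem.Set.nodup_ofList workTimes)

theorem pv_mem_ks (workTimes : List Int) (w : Int) : w ∈ pvKs workTimes ↔ w ∈ workTimes := by
  unfold pvKs
  rw [PySem.List.mem_sorted]
  exact PySem.Set.mem_ofList workTimes w

theorem pv_T_perm (pays workTimes : List Int) :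
    (pvT pays workTimes).Perm (workTimes.zip pays) := by
  unfold pvT
  have hblock : ∀ w ∈ pvKs workTimes,
      ((pvSG pays workTimes w).map (fun p => (w, p))).Perm
        ((workTimes.zip pays).filter (fun p => p.1 == w)) := by
    intro w _
    have h1 : ((pvSG pays workTimes w).map (fun p => (w, p))).Perm
        ((pvGrp pays workTimes w).map (fun p => (w, p))) :=
      (PySem.List.sorted_perm (pvGrp pays workTimes w) (fun x => x) false).map _
    have h2 : (pvGrp pays workTimes w).map (fun p => ((w : Int), p)) =
        (workTimes.zip pays).filter (fun p => p.1 == w) := by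
      unfold pvGrp
      rw [List.map_map]
      exact pv_map_filter_id _ w
    rw [← h2]
    exact h1
  refine ((pv_flatMap_perm_congr _ _ _ hblock).trans ?_)
  apply pv_partition_perm _ _ (pv_ks_nodup workTimes)
  intro p hp
  rw [pv_mem_ks]
  exact (List.of_mem_zip (a := p.1) (b := p.2) (by simpa using hp)).1

theorem pv_T_pairwise (pays workTimes : List Int) :
    (pvT pays workTimes).Pairwise pvLexLe := by
  unfold pvT
  have hlt : (pvKs workTimes).Pairwise (· < ·) :=
    PySem.List.sorted_ofList_pairwise_lt workTimes
  generalize pvKs workTimes = ks at hlt ⊢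
  induction ks with
  | nil => simp
  | cons k ks ih =>
    rcases List.pairwise_cons.1 hlt with ⟨hk, hks⟩
    rw [List.flatMap_cons, List.pairwise_append]
    refine ⟨?_, ih hks, ?_⟩
    · rw [List.pairwise_map]
      have := PySem.List.sorted_pairwise (pvGrp pays workTimes k) (fun x => x)
      exact this.imp (fun h => Or.inr ⟨rfl, h⟩)
    · intro a ha b hb
      rcases List.mem_map.1 ha with ⟨pa, _, rfl⟩
      rcases List.mem_flatMap.1 hb with ⟨w, hw, hbw⟩
      rcases List.mem_map.1 hbw with ⟨pb, _, rfl⟩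
      exact Or.inl (hk w hw)

theorem pv_pairs_eq_T (pays workTimes : List Int) :
    PySem.List.sorted2 (workTimes.zip pays) (fun p => p.1) (fun p => p.2) = pvT pays workTimes := by
  refine List.Perm.eq_of_pairwise ?_ (pv_sorted2_pairwise _) (pv_T_pairwise _ _) ?_
  · intro a b _ _ h1 h2; exact pvLexLe_antisymm a b h1 h2
  · exact (PySem.List.sorted2_perm _ _ _ _).trans (pv_T_perm pays workTimes).symm

-- === A-side lemmas ===

-- an index loop reading two lists at the same index is a fold over their zip
theorem pv_foldl_range2_nat {σ : Type} (f : σ → Int → Int → σ) :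
    ∀ (ws ps : List Int) (init : σ), ws.length ≤ ps.length →
    (List.range ws.length).foldl (fun st k => f st (ws.getD k 0) (ps.getD k 0)) init =
      (ws.zip ps).foldl (fun st p => f st p.1 p.2) init := by
  intro ws
  induction ws with
  | nil => intro ps init _; simp
  | cons w ws ih =>
    intro ps init h
    cases ps with
    | nil => simp at h
    | cons p ps =>
      rw [List.length_cons, List.range_succ_eq_map, List.foldl_cons, List.foldl_map]
      simp only [List.getD_cons_zero, List.getD_cons_succ, Nat.succ_eq_add_one]
      rw [List.zip_cons_cons, List.foldl_cons]
      exact ih ps (f init w p) (by simpa using h)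

theorem pv_foldl_range2 {σ : Type} (f : σ → Int → Int → σ) (ws ps : List Int) (init : σ)
    (h : ws.length ≤ ps.length) :
    (PySem.List.pyRange 0 (PySem.List.len ws) 1).foldl
      (fun st i => f st (PySem.List.pyGetD ws i 0) (PySem.List.pyGetD ps i 0)) init =
      (ws.zip ps).foldl (fun st p => f st p.1 p.2) init := by
  rw [PySem.List.pyRange_one, List.foldl_map]
  have hlen : ((PySem.List.len ws : Int) - 0).toNat = ws.length := by
    simp [PySem.List.len_eq]
  rw [hlen]
  have hstep : (fun (st : σ) (k : Nat) =>
      f st (PySem.List.pyGetD ws ((0 : Int) + k) 0) (PySem.List.pyGetD ps ((0 : Int) + k) 0)) =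
      fun st k => f st (ws.getD k 0) (ps.getD k 0) := by
    funext st k
    rw [zero_add, PySem.List.pyGetD_natCast, PySem.List.pyGetD_natCast]
  rw [hstep]
  exact pv_foldl_range2_nat f ws ps init h

-- A's first loop, specialised: the step function of the port
theorem pv_foldA1 (pays workTimes : List Int) (h : workTimes.length ≤ pays.length) :
    (PySem.List.pyRange 0 (PySem.List.len workTimes) 1).foldl
      (fun (st : PySem.Dict Int Int × PySem.Dict Int (List Int)) i =>
        if st.2.contains (PySem.List.pyGetD workTimes i 0) then
          (st.1, st.2.modify (PySem.List.pyGetD workTimes i 0) []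
                   (fun g => g ++ [PySem.List.pyGetD pays i 0]))
        else
          (st.1.insert (PySem.List.pyGetD workTimes i 0) (-1),
           st.2.insert (PySem.List.pyGetD workTimes i 0) [PySem.List.pyGetD pays i 0]))
      (PySem.Dict.empty, PySem.Dict.empty) =
    (workTimes.zip pays).foldl
      (fun (st : PySem.Dict Int Int × PySem.Dict Int (List Int)) p =>
        if st.2.contains p.1 then (st.1, st.2.modify p.1 [] (fun g => g ++ [p.2]))
        else (st.1.insert p.1 (-1), st.2.insert p.1 [p.2]))
      (PySem.Dict.empty, PySem.Dict.empty) :=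
  pv_foldl_range2
    (fun (st : PySem.Dict Int Int × PySem.Dict Int (List Int)) w p =>
      if st.2.contains w then (st.1, st.2.modify w [] (fun g => g ++ [p]))
      else (st.1.insert w (-1), st.2.insert w [p]))
    workTimes pays _ h

-- the second component of A's first loop is the plain grouping fold
theorem pv_foldA1_snd (l : List (Int × Int)) :
    ∀ (st : PySem.Dict Int Int × PySem.Dict Int (List Int)),
    (l.foldl
      (fun (st : PySem.Dict Int Int × PySem.Dict Int (List Int)) p =>
        if st.2.contains p.1 then (st.1, st.2.modify p.1 [] (fun g => g ++ [p.2]))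
        else (st.1.insert p.1 (-1), st.2.insert p.1 [p.2]))
      st).2 =
    l.foldl (fun d p => d.modify p.1 [] (fun g => g ++ [p.2])) st.2 := by
  induction l with
  | nil => intro st; rfl
  | cons p l ih =>
    intro st
    rw [List.foldl_cons, List.foldl_cons, ih]
    by_cases hc : st.2.contains p.1 = true
    · simp [hc]
    · have hc' : st.2.contains p.1 = false := by simpa using hc
      have : st.2.insert p.1 [p.2] = st.2.modify p.1 [] (fun g => g ++ [p.2]) := by
        simp [PySem.Dict.modify, PySem.Dict.getD_of_not_contains _ _ hc']
      simp [hc', this]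

-- A's second loop splits into an insert fold and key collection
theorem pv_foldA2 (v : Int → Int) (ks : List Int) :
    ∀ (d : PySem.Dict Int Int) (acc : List Int),
    ks.foldl (fun (st2 : PySem.Dict Int Int × List Int) wt =>
        (st2.1.insert wt (v wt), st2.2 ++ [wt])) (d, acc) =
      (ks.foldl (fun d wt => d.insert wt (v wt)) d, acc ++ ks) := by
  induction ks with
  | nil => intro d acc; simp
  | cons k ks ih => intro d acc; rw [List.foldl_cons, ih, List.foldl_cons]; simp

theorem pv_getD_foldl_insert_not_mem (v : Int → Int) (ks : List Int) :
    ∀ (d : PySem.Dict Int Int) (w : Int), w ∉ ks →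
    (ks.foldl (fun d k => d.insert k (v k)) d).getD w 0 = d.getD w 0 := by
  induction ks with
  | nil => intro d w _; rfl
  | cons k ks ih =>
    intro d w hw
    rw [List.foldl_cons, ih _ _ (fun h => hw (by simp [h]))]
    rw [PySem.Dict.getD_insert]
    simp only [List.mem_cons, not_or] at hw
    simp [hw.1]

theorem pv_getD_foldl_insert_mem (v : Int → Int) (ks : List Int) :
    ∀ (d : PySem.Dict Int Int) (w : Int), ks.Nodup → w ∈ ks →
    (ks.foldl (fun d k => d.insert k (v k)) d).getD w 0 = v w := by
  induction ks with
  | nil => intro d w _ h; simp at h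
  | cons k ks ih =>
    intro d w hnd hw
    rcases List.nodup_cons.1 hnd with ⟨hk, hnd'⟩
    rw [List.foldl_cons]
    rcases List.mem_cons.1 hw with rfl | hw'
    · rw [pv_getD_foldl_insert_not_mem v ks _ _ hk]
      simp
    · exact ih _ _ hnd' hw'

-- the final dict built over nodup fresh keys lists exactly those pairs
theorem pv_items_final (v : Int → Int) (ks : List Int) (hnd : ks.Nodup) :
    (ks.foldl (fun (d : PySem.Dict Int Int) wt => d.insert wt (v wt)) PySem.Dict.empty).items =
      ks.map (fun w => (w, v w)) := by
  have h := PySem.Dict.items_foldl_insert_fresh ks (fun w => w) v PySem.Dict.empty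
    (fun a _ => PySem.Dict.contains_empty a) (by simpa using hnd)
  simpa using h

-- A's grouping dict holds each group in input order
theorem pv_allA_getD (pays workTimes : List Int) (w : Int) :
    ((workTimes.zip pays).foldl (fun d p => d.modify p.1 [] (fun g => g ++ [p.2]))
        PySem.Dict.empty).getD w [] = pvGrp pays workTimes w := by
  have h := PySem.Dict.getD_foldl_modify_append (workTimes.zip pays) PySem.Dict.empty w
  unfold pvGrp
  simpa using h

-- A's grouping dict's keys are the distinct work-times in first-occurrence order
theorem pv_allA_keys (pays workTimes : List Int) (h : workTimes.length ≤ pays.length) :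
    ((workTimes.zip pays).foldl (fun d p => d.modify p.1 [] (fun g => g ++ [p.2]))
        PySem.Dict.empty).keys = PySem.Set.ofList workTimes := by
  have hk := PySem.Dict.keys_foldl_modify_key (workTimes.zip pays) (fun p => p.1) []
    (fun _ p => fun g => g ++ [p.2]) PySem.Dict.empty
  rw [hk, PySem.Dict.keys_empty, List.map_fst_zip h]
  rfl

-- the per-key value A computes equals pvVal
theorem pv_valA_eq (pays workTimes : List Int) (w : Int) :
    PySem.List.pyGetD (pvSG pays workTimes w)
      (PySem.Int.floordiv (PySem.List.len (pvSG pays workTimes w)) 2) 0 =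
      pvVal pays workTimes w := by
  unfold pvVal
  rw [PySem.List.len_eq]
  have h2 : PySem.Int.floordiv ((pvSG pays workTimes w).length : Int) 2 =
      (((pvSG pays workTimes w).length / 2 : Nat) : Int) := by
    exact_mod_cast PySem.Int.floordiv_natCast (pvSG pays workTimes w).length 2
  rw [h2, PySem.List.pyGetD_natCast]

-- groups of present keys are nonempty
theorem pv_grp_ne_nil (pays workTimes : List Int) (w : Int) (hw : w ∈ workTimes)
    (h : workTimes.length ≤ pays.length) : pvSG pays workTimes w ≠ [] := by
  intro hnil
  have hgrp : pvGrp pays workTimes w = [] :=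
    (PySem.List.sorted_eq_nil_iff (pvGrp pays workTimes w) (fun x => x) false).1 hnil
  unfold pvGrp at hgrp
  have hfil := List.map_eq_nil_iff.1 hgrp
  have hmem : w ∈ (workTimes.zip pays).map Prod.fst := by
    rw [List.map_fst_zip h]; exact hw
  rcases List.mem_map.1 hmem with ⟨p, hp, hfst⟩
  have hx := List.filter_eq_nil_iff.1 hfil p hp
  simp [hfst] at hx

-- === B-side lemmas ===

theorem pv_counts_eq_counter (pairs : List (Int × Int)) :
    pairs.foldl (fun (d : PySem.Dict Int Int) p => d.insert p.1 (d.getD p.1 0 + 1))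
        PySem.Dict.empty =
      PySem.Dict.counter (pairs.map (fun p => p.1)) := by
  rw [← PySem.Dict.foldl_insert_getD_add_one_eq_counter, List.foldl_map]

theorem pv_map_fst_T (pays workTimes : List Int) :
    (pvT pays workTimes).map (fun p => p.1) =
      (pvKs workTimes).flatMap (fun w => List.replicate (pvSG pays workTimes w).length w) := by
  unfold pvT
  rw [List.map_flatMap]
  apply List.flatMap_congr
  intro w _
  rw [List.map_map]
  exact List.map_const'


-- Set.update of a key-run flatMap over fresh nodup keys appends the keys
theorem pv_update_replicate_mem (s : List Int) (w : Int) (m : Nat) (hw : w ∈ s) :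
    PySem.Set.update s (List.replicate m w) = s := by
  induction m with
  | zero => rfl
  | succ m ih =>
    rw [List.replicate_succ]
    show PySem.Set.update (PySem.Set.add s w) (List.replicate m w) = s
    have hadd : PySem.Set.add s w = s := by
      simp [PySem.Set.add, hw]
    rw [hadd, ih]

theorem pv_update_replicate (s : List Int) (w : Int) (m : Nat) (hw : w ∉ s) (hm : 0 < m) :
    PySem.Set.update s (List.replicate m w) = s ++ [w] := by
  cases m with
  | zero => omega
  | succ m =>
    rw [List.replicate_succ]
    show PySem.Set.update (PySem.Set.add s w) (List.replicate m w) = s ++ [w]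
    have h1 : PySem.Set.add s w = s ++ [w] := by
      simp [PySem.Set.add, hw]
    rw [h1]
    exact pv_update_replicate_mem _ _ _ (by simp)

theorem pv_update_flatMap (n : Int → Nat) (ks : List Int) :
    ∀ (s : List Int), ks.Nodup → (∀ w ∈ ks, w ∉ s) → (∀ w ∈ ks, 0 < n w) →
    PySem.Set.update s (ks.flatMap (fun w => List.replicate (n w) w)) = s ++ ks := by
  induction ks with
  | nil => intro s _ _ _; simp [PySem.Set.update]
  | cons k ks ih =>
    intro s hnd hfresh hpos
    rcases List.nodup_cons.1 hnd with ⟨hk, hnd'⟩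
    rw [List.flatMap_cons]
    have hsplit : PySem.Set.update s (List.replicate (n k) k ++
        ks.flatMap (fun w => List.replicate (n w) w)) =
        PySem.Set.update (PySem.Set.update s (List.replicate (n k) k))
          (ks.flatMap (fun w => List.replicate (n w) w)) := by
      simp [PySem.Set.update, List.foldl_append]
    rw [hsplit, pv_update_replicate s k (n k) (hfresh k (by simp)) (hpos k (by simp))]
    rw [ih (s ++ [k]) hnd' ?_ (fun w hw => hpos w (by simp [hw]))]
    · simp
    · intro w hw
      simp only [List.mem_append, List.mem_singleton, not_or]
      exact ⟨fun h => hfresh w (by simp [hw]) h, fun h => hk (h ▸ hw)⟩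

theorem pv_count_flatMap_replicate (n : Int → Nat) (ks : List Int) (w : Int)
    (hnd : ks.Nodup) (hw : w ∈ ks) :
    (ks.flatMap (fun u => List.replicate (n u) u)).count w = n w := by
  induction ks with
  | nil => simp at hw
  | cons k ks ih =>
    rcases List.nodup_cons.1 hnd with ⟨hk, hnd'⟩
    rw [List.flatMap_cons, List.count_append]
    rcases List.mem_cons.1 hw with rfl | hw'
    · rw [List.count_replicate_self]
      have : (ks.flatMap (fun u => List.replicate (n u) u)).count w = 0 := by
        rw [List.count_eq_zero]
        intro hmem
        rcases List.mem_flatMap.1 hmem with ⟨u, hu, hrep⟩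
        rcases List.eq_of_mem_replicate hrep with rfl
        exact hk hu
      omega
    · rw [ih hnd' hw']
      have : (List.replicate (n k) k).count w = 0 := by
        rw [List.count_eq_zero]
        intro hmem
        rcases List.eq_of_mem_replicate hmem with rfl
        exact hk hw'
      omega

-- B's index scan over the concatenated groups inserts each group's middle element
theorem pv_bscan (pays workTimes : List Int) (L : List (Int × Int)) (ds : List Int) :
    ∀ (pre : List (Int × Int)) (d : PySem.Dict Int Int),
    L = pre ++ ds.flatMap (fun w => (pvSG pays workTimes w).map (fun p => (w, p))) →
    (∀ w ∈ ds, pvSG pays workTimes w ≠ []) →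
    ((ds.map (fun w => (w, ((pvSG pays workTimes w).length : Int)))).foldl
      (fun (st : PySem.Dict Int Int × Int) wc =>
        (st.1.insert wc.1 (PySem.List.pyGetD L (st.2 + PySem.Int.floordiv wc.2 2) (0, 0)).2,
         st.2 + wc.2))
      (d, (pre.length : Int))).1 =
    ds.foldl (fun d w => d.insert w (pvVal pays workTimes w)) d := by
  induction ds with
  | nil => intro pre d _ _; rfl
  | cons k ds ih =>
    intro pre d hL hne
    rw [List.map_cons, List.foldl_cons, List.foldl_cons]
    set n := (pvSG pays workTimes k).length with hn
    have hpos : 0 < n := by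
      rw [hn]; exact List.length_pos_iff.2 (hne k (by simp))
    have hidx : (pre.length : Int) + PySem.Int.floordiv (n : Int) 2 =
        ((pre.length + n / 2 : Nat) : Int) := by
      have h2 : PySem.Int.floordiv (n : Int) 2 = ((n / 2 : Nat) : Int) := by
        exact_mod_cast PySem.Int.floordiv_natCast n 2
      rw [h2]
      push_cast
      ring
    have hget : (PySem.List.pyGetD L ((pre.length : Int) + PySem.Int.floordiv (n : Int) 2)
        (0, 0)).2 = pvVal pays workTimes k := by
      rw [hidx, PySem.List.pyGetD_natCast]
      rw [hL, List.flatMap_cons]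
      have hdiv : n / 2 < n := Nat.div_lt_self hpos (by omega)
      rw [← List.append_assoc]
      have hlt : pre.length + n / 2 <
          (pre ++ (pvSG pays workTimes k).map (fun p => (k, p))).length := by
        simp [hn]; omega
      rw [List.getD_eq_getElem?_getD, List.getElem?_append_left hlt,
        List.getElem?_append_right (by omega)]
      have : pre.length + n / 2 - pre.length = n / 2 := by omega
      rw [this]
      rw [List.getElem?_map]
      have h3 : (pvSG pays workTimes k)[n / 2]? = some ((pvSG pays workTimes k).getD (n/2) 0) := by
        rw [List.getD_eq_getElem?_getD]
        cases h4 : (pvSG pays workTimes k)[n / 2]? with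
        | none => rw [List.getElem?_eq_none_iff] at h4; omega
        | some x => rfl
      rw [h3]
      unfold pvVal
      rfl
    rw [hget]
    have hlen : ((pre.length : Int) + (n : Int)) =
        (((pre ++ (pvSG pays workTimes k).map (fun p => (k, p))).length : Nat) : Int) := by
      simp [hn]
    rw [hlen]
    exact ih (pre ++ (pvSG pays workTimes k).map (fun p => (k, p)))
      (d.insert k (pvVal pays workTimes k))
      (by rw [hL, List.flatMap_cons, List.append_assoc])
      (fun w hw => hne w (by simp [hw]))

-- === assembly ===

theorem pv_A_eq (pays workTimes : List Int) (h : workTimes.length ≤ pays.length) :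
    getMedianPaysByWorkTime pays workTimes =
      (pvKs workTimes).map (fun w => (w, pvVal pays workTimes w)) := by
  simp only [getMedianPaysByWorkTime]
  rw [pv_foldA1 pays workTimes h]
  rw [pv_foldA1_snd]
  simp only [pv_allA_getD, pv_allA_keys pays workTimes h]
  rw [pv_foldA2 (fun wt => PySem.List.pyGetD
      (PySem.List.sorted (pvGrp pays workTimes wt) (fun x => x))
      (PySem.Int.floordiv (PySem.List.len
        (PySem.List.sorted (pvGrp pays workTimes wt) (fun x => x))) 2) 0)]
  simp only [List.nil_append]
  have hks : PySem.List.sorted (PySem.Set.ofList workTimes) (fun x => x) = pvKs workTimes := rfl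
  rw [hks, pv_items_final _ _ (pv_ks_nodup workTimes)]
  apply List.map_congr_left
  intro w hw
  have hwks : w ∈ PySem.Set.ofList workTimes := by
    have := (pv_mem_ks workTimes w).1 hw
    exact (PySem.Set.mem_ofList workTimes w).2 this
  rw [pv_getD_foldl_insert_mem _ _ _ _ (PySem.Set.nodup_ofList workTimes) hwks]
  have := pv_valA_eq pays workTimes w
  unfold pvSG at this
  rw [this]

theorem pv_ofList_F (pays workTimes : List Int) (h : workTimes.length ≤ pays.length) :
    PySem.Set.ofList ((pvKs workTimes).flatMap
        (fun w => List.replicate (pvSG pays workTimes w).length w)) = pvKs workTimes := by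
  have := pv_update_flatMap (fun w => (pvSG pays workTimes w).length) (pvKs workTimes) []
    (pv_ks_nodup workTimes) (by intro w _; simp)
    (fun w hw => List.length_pos_iff.2
      (pv_grp_ne_nil pays workTimes w ((pv_mem_ks workTimes w).1 hw) h))
  simpa [PySem.Set.ofList, PySem.Set.update, PySem.Set.empty] using this

theorem pv_counts_items (pays workTimes : List Int) (h : workTimes.length ≤ pays.length) :
    ((pvT pays workTimes).foldl
        (fun (d : PySem.Dict Int Int) p => d.insert p.1 (d.getD p.1 0 + 1))
        PySem.Dict.empty).items =
      (pvKs workTimes).map (fun w => (w, ((pvSG pays workTimes w).length : Int))) := by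
  rw [pv_counts_eq_counter, PySem.Dict.items_counter, pv_map_fst_T, pv_ofList_F pays workTimes h]
  apply List.map_congr_left
  intro w hw
  rw [pv_count_flatMap_replicate _ _ _ (pv_ks_nodup workTimes) hw]

theorem pv_B_eq (pays workTimes : List Int) (h : workTimes.length ≤ pays.length) :
    getMedianPaysByWorkTime_alt pays workTimes =
      (pvKs workTimes).map (fun w => (w, pvVal pays workTimes w)) := by
  simp only [getMedianPaysByWorkTime_alt]
  rw [pv_pairs_eq_T, pv_counts_items pays workTimes h]
  have hb := pv_bscan pays workTimes (pvT pays workTimes) (pvKs workTimes) [] PySem.Dict.empty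
    (by simp [pvT]) (fun w hw => pv_grp_ne_nil pays workTimes w ((pv_mem_ks workTimes w).1 hw) h)
  simp only [List.length_nil, Nat.cast_zero] at hb
  rw [hb]
  exact pv_items_final _ _ (pv_ks_nodup workTimes)

-- ===== VERDICT (by name: the statement is the Claim_ definition above) =====
theorem getMedianPaysByWorkTime_spec : Claim_equal_getMedianPaysByWorkTime := by
  intro pays workTimes _ hpre
  unfold Spec_getMedianPaysByWorkTime
  rw [pv_A_eq pays workTimes hpre, pv_B_eq pays workTimes hpre]
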